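-- pv_equiv track=rewrite | github.com/Mr-Sonntag/-Mr-Sonntag-Portfolio | Advent of Code/2025/Day 2/gift_shop.py | count_prime_ranges
-- ===== SOURCE A (Python) =====
-- def is_prime(n):
--
--     #Special case:
--     if n == 1:
--         return False
--
--     if n == 2:
--         return True
--
--     if n % 2 == 0:
--         return False
--
--     i = 3
--
--     while i * i <= n:
--         if n % i == 0:
--             return False
--         i += 2
--
--     return True
--
-- def count_prime_ranges(item_ids):
--     total = 0
--     total_primes = 0
--
--     for item_id in item_ids:
--         lower, upper = item_id.split("-")
--
--         total+=1
--         total_primes+=1 if is_prime(len(lower)) and is_prime(len(upper)) else 0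
--
--     return total, total_primes
-- ===== SOURCE B (Python) =====
-- def count_prime_ranges(item_ids):
--     # Two-pass: collect both part lengths per item, build the set of prime
--     # numbers up to the largest length once, then count by set membership.
--     pairs = [item_id.split("-") for item_id in item_ids]
--     lengths = [(len(lower), len(upper)) for lower, upper in pairs]
--     biggest = max([max(a, b) for a, b in lengths], default=0)
--     primes = set(p for p in range(2, biggest + 1)
--                  if all(p % d for d in range(2, p)))
--     hits = sum(1 for a, b in lengths if a in primes and b in primes)
--     return len(item_ids), hits
-- ===== Notes on version B (the rewrite author's own statement) =====
-- stated objective: alternative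
-- what changed: B makes two passes: it first collects both part lengths of every item and precomputes the set of primes up to the largest length once, then counts items by set membership, instead of A's per-item sqrt-bounded odd trial-division primality test inside the loop.
import Mathlib
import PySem

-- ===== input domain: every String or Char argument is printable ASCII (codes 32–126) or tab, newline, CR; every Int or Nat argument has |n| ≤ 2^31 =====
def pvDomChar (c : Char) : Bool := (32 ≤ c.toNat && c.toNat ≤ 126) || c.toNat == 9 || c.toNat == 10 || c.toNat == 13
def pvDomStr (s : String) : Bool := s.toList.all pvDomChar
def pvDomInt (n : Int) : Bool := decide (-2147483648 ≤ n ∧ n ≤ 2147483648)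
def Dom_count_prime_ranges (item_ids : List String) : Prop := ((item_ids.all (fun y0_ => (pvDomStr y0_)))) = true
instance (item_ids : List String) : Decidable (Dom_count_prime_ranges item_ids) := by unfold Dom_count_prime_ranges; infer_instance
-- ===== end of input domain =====

-- B replaces A's per-item sqrt/odd trial-division primality test by one precomputed
-- table of the primes up to the largest part length, consulted by set membership
-- (objective: alternative — a table pass plus lookups instead of a test inside the loop).

-- ===== PORT A =====
-- i ≤ i*i for every integer (termination of isPrimeLoop)
theorem pv_le_mul_self (i : Int) : i ≤ i * i := by
  by_cases h : i ≤ 0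
  · nlinarith [mul_self_nonneg i]
  · nlinarith

-- while i * i <= n: if n % i == 0: return False; i += 2
def isPrimeLoop (n i : Int) : Bool :=
  if h : i * i ≤ n then
    if PySem.Int.mod n i == 0 then false
    else isPrimeLoop n (i + 2)
  else true
  termination_by (n + 2 - i).toNat
  decreasing_by
    have h1 : i ≤ i * i := pv_le_mul_self i
    omega

def is_prime (n : Int) : Bool :=
  if n == 1 then false
  else if n == 2 then true
  else if PySem.Int.mod n 2 == 0 then false
  else isPrimeLoop n 3

def count_prime_ranges (item_ids : List String) : Int × Int :=
  item_ids.foldl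
    (fun acc item_id =>
      match (PySem.Str.split? item_id "-").getD [] with  -- sep "-" ≠ "", so split? is `some`
      | [lower, upper] =>
          (acc.1 + 1,
           acc.2 + (if is_prime (PySem.Str.len lower) && is_prime (PySem.Str.len upper) then 1 else 0))
      | _ => acc)   -- Python raises ValueError (unpack) here; such inputs are excluded by Pre_
    (0, 0)

-- ===== PORT B =====
-- all(p % d for d in range(2, p))
def trialPrime (p : Int) : Bool :=
  (PySem.List.pyRange 2 p).all (fun d => PySem.Int.mod p d != 0)

-- (len(lower), len(upper)) for a two-part split
def partLens (p : List String) : Int × Int :=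
  match p with
  | [lower, upper] => (PySem.Str.len lower, PySem.Str.len upper)
  | [] => ((0 : Int), (0 : Int))          -- Python raises ValueError (unpack) here; excluded by Pre_
  | [_] => ((0 : Int), (0 : Int))         -- likewise excluded by Pre_
  | _ :: _ :: _ :: _ => ((0 : Int), (0 : Int))  -- likewise excluded by Pre_

def count_prime_ranges_alt (item_ids : List String) : Int × Int :=
  let pairs := item_ids.map (fun s => (PySem.Str.split? s "-").getD [])
  let lengths := pairs.map partLens
  let biggest := PySem.List.maxD (lengths.map (fun ab => max ab.1 ab.2)) (fun x => x) 0
  let primes := PySem.Set.ofList ((PySem.List.pyRange 2 (biggest + 1)).filter trialPrime)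
  let hits := lengths.foldl
    (fun acc ab => acc + (if primes.contains ab.1 && primes.contains ab.2 then 1 else 0)) 0
  ((item_ids.length : Int), hits)

-- ===== PRECONDITION & SPEC =====
-- Pre_ excludes exactly the inputs where Python A raises ValueError: an item whose
-- split("-") does not have exactly two parts (no '-' or more than one '-').
def Pre_count_prime_ranges (item_ids : List String) : Prop :=
  ∀ s ∈ item_ids, ((PySem.Str.split? s "-").getD []).length = 2
instance (item_ids : List String) : Decidable (Pre_count_prime_ranges item_ids) := by
  unfold Pre_count_prime_ranges; infer_instance

def pvWitness_count_prime_ranges : List String := ["a-bb", "xxx-yy", "-zzzzz"]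

def Spec_count_prime_ranges (item_ids : List String) (out : Int × Int) : Prop := out = count_prime_ranges_alt item_ids
instance (item_ids : List String) (out : Int × Int) : Decidable (Spec_count_prime_ranges item_ids out) := by unfold Spec_count_prime_ranges; infer_instance

-- ===== CLAIM (what is proved, stated in full; the proofs are below) =====
def Claim_equal_count_prime_ranges : Prop := ∀ (item_ids : List String), Dom_count_prime_ranges item_ids → Pre_count_prime_ranges item_ids → Spec_count_prime_ranges item_ids (count_prime_ranges item_ids)

-- ===== LEMMAS AND PROOFS =====

-- A's loop decides primality of odd n ≥ 3, given that no divisor below i was found.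
theorem isPrimeLoop_iff (n : Int) (hn : 3 ≤ n) (hodd : ¬ (2:Int) ∣ n)
    (i : Int) (hi : 3 ≤ i) (hi2 : i % 2 = 1)
    (inv : ∀ j : Int, 2 ≤ j → j < i → ¬ j ∣ n) :
    isPrimeLoop n i = true ↔ Nat.Prime n.toNat := by
  rw [isPrimeLoop]
  split_ifs with h1 h2
  · -- i*i ≤ n and n % i == 0 : the loop returns False, and n is composite
    simp only [false_iff]
    have hdvd : i ∣ n := (PySem.Int.mod_eq_zero_iff_dvd n i).mp (by simpa using h2)
    intro hp
    have hin : i < n := by nlinarith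
    have hdn : i.toNat ∣ n.toNat := by
      have : (i.toNat : Int) ∣ (n.toNat : Int) := by
        rwa [Int.toNat_of_nonneg (by omega), Int.toNat_of_nonneg (by omega)]
      exact_mod_cast this
    rcases hp.eq_one_or_self_of_dvd i.toNat hdn with h | h <;> omega
  · -- i*i ≤ n and n % i ≠ 0 : recurse at i+2, extending the invariant over i and i+1
    have hodd2 : ¬ (i+1) ∣ n := by
      intro hc
      exact hodd (dvd_trans ⟨(i+1)/2, by omega⟩ hc)
    exact isPrimeLoop_iff n hn hodd (i+2) (by omega) (by omega)
      (fun j h2j hji => by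
        rcases lt_trichotomy j i with h | h | h
        · exact inv j h2j h
        · subst h
          intro hc
          exact absurd (by simp [(PySem.Int.mod_eq_zero_iff_dvd n j).mpr hc] :
            (PySem.Int.mod n j == 0) = true) h2
        · have : j = i + 1 := by omega
          subst this; exact hodd2)
  · -- n < i*i : the loop returns True, and n is prime (a composite has a divisor d, d*d ≤ n)
    simp only [true_iff]
    by_contra hp
    have hpp : Nat.Prime n.toNat.minFac := Nat.minFac_prime (by omega)
    have hd : n.toNat.minFac ∣ n.toNat := Nat.minFac_dvd _
    have hsq : n.toNat.minFac ^ 2 ≤ n.toNat := Nat.minFac_sq_le_self (by omega) hp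
    set q : Int := (n.toNat.minFac : Int) with hq
    have h2q : 2 ≤ q := by rw [hq]; exact_mod_cast hpp.two_le
    have hqd : q ∣ n := by
      have : (n.toNat.minFac : Int) ∣ (n.toNat : Int) := Int.natCast_dvd_natCast.mpr hd
      rwa [Int.toNat_of_nonneg (by omega)] at this
    have hqq : q * q ≤ n := by
      have h' : ((n.toNat.minFac : Int)) ^ 2 ≤ ((n.toNat : Nat) : Int) := by exact_mod_cast hsq
      rw [Int.toNat_of_nonneg (by omega : (0:Int) ≤ n)] at h'
      rw [hq]; nlinarith [h']
    have hqi : q < i := by nlinarith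
    exact inv q h2q hqi hqd
  termination_by (n + 2 - i).toNat
  decreasing_by
    have h1 : i ≤ i * i := pv_le_mul_self i
    omega

theorem is_prime_iff (n : Int) (h0 : 0 ≤ n) : is_prime n = true ↔ Nat.Prime n.toNat := by
  rw [is_prime]
  split_ifs with h1 h2 h3
  · simp only [false_iff]
    have : n = 1 := by simpa using h1
    subst this; decide
  · simp only [true_iff]
    have : n = 2 := by simpa using h2
    subst this; decide
  · simp only [false_iff]
    have hd : (2:Int) ∣ n := (PySem.Int.mod_eq_zero_iff_dvd n 2).mp (by simpa using h3)
    intro hp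
    have hdn : 2 ∣ n.toNat := by
      have : ((2:Nat) : Int) ∣ ((n.toNat : Nat) : Int) := by
        rwa [Int.toNat_of_nonneg h0]
      exact_mod_cast this
    rcases hp.eq_one_or_self_of_dvd 2 hdn with h | h
    · omega
    · simp at h1 h2; omega
  · have hodd : ¬ (2:Int) ∣ n :=
      fun hc => h3 (by rw [beq_iff_eq]; exact (PySem.Int.mod_eq_zero_iff_dvd n 2).mpr hc)
    have hn3 : 3 ≤ n := by
      simp at h1 h2
      rcases Int.even_or_odd n with he | ho
      · exact absurd he.two_dvd hodd
      · omega
    exact isPrimeLoop_iff n hn3 hodd 3 (by omega) (by decide)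
      (fun j h2j hj3 => by
        have : j = 2 := by omega
        subst this; exact hodd)

theorem trialPrime_iff (a : Int) (h2 : 2 ≤ a) : trialPrime a = true ↔ Nat.Prime a.toNat := by
  rw [trialPrime, List.all_eq_true, Nat.prime_def_lt']
  constructor
  · intro h
    refine ⟨by omega, fun m h2m hma hdvd => ?_⟩
    have hmem : (m : Int) ∈ PySem.List.pyRange 2 a := by
      rw [PySem.List.mem_pyRange_one]; omega
    have hne := h _ hmem
    simp only [bne_iff_ne, ne_eq] at hne
    apply hne
    rw [PySem.Int.mod_eq_zero_iff_dvd]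
    have : (m : Int) ∣ ((a.toNat : Nat) : Int) := Int.natCast_dvd_natCast.mpr hdvd
    rwa [Int.toNat_of_nonneg (by omega)] at this
  · intro ⟨_, h⟩ d hd
    rw [PySem.List.mem_pyRange_one] at hd
    simp only [bne_iff_ne, ne_eq, PySem.Int.mod_eq_zero_iff_dvd]
    intro hdvd
    apply h d.toNat (by omega) (by omega)
    have : d.toNat ∣ a.toNat := by
      apply Int.natCast_dvd_natCast.mp
      rwa [Int.toNat_of_nonneg (by omega), Int.toNat_of_nonneg (by omega)]
    exact this

-- B's precomputed table agrees with A's test for every 0 ≤ a ≤ biggest.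
theorem contains_primes_eq (a biggest : Int) (h0 : 0 ≤ a) (hb : a ≤ biggest) :
    (PySem.Set.ofList ((PySem.List.pyRange 2 (biggest + 1)).filter trialPrime)).contains a
      = is_prime a := by
  rw [Bool.eq_iff_iff, PySem.Set.contains_iff, PySem.Set.mem_ofList, List.mem_filter,
    PySem.List.mem_pyRange_one, is_prime_iff a h0]
  by_cases h2 : 2 ≤ a
  · rw [trialPrime_iff a h2]
    constructor
    · exact fun h => h.2
    · exact fun h => ⟨⟨h2, by omega⟩, h⟩
  · constructor
    · intro h; omega
    · intro hp
      exfalso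
      have := hp.two_le
      omega

-- an element of the list is bounded by max(list, default=0)
theorem le_maxD_id (xs : List Int) (x : Int) (hx : x ∈ xs) :
    x ≤ PySem.List.maxD xs (fun y => y) 0 := by
  rcases h : PySem.List.max? xs (fun y => y) with _ | m
  · rw [PySem.List.max?_eq_none_iff] at h
    subst h; simp at hx
  · have := PySem.List.max?_isMax h x hx
    simpa [PySem.List.maxD, h] using this

-- A's loop over the items, with both counters made explicit.
theorem foldA (xs : List String) (t p : Int)
    (h : ∀ s ∈ xs, ((PySem.Str.split? s "-").getD []).length = 2) :
    xs.foldl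
      (fun acc item_id =>
        match (PySem.Str.split? item_id "-").getD [] with
        | [lower, upper] =>
            (acc.1 + 1,
             acc.2 + (if is_prime (PySem.Str.len lower) && is_prime (PySem.Str.len upper) then 1 else 0))
        | _ => acc)
      (t, p)
    = (t + xs.length,
       p + (xs.countP (fun s =>
         match (PySem.Str.split? s "-").getD [] with
         | [lower, upper] => is_prime (PySem.Str.len lower) && is_prime (PySem.Str.len upper)
         | _ => false) : Int)) := by
  induction xs generalizing t p with
  | nil => simp
  | cons s rest ih =>
    have hs := h s (by simp)
    rcases hl : (PySem.Str.split? s "-").getD [] with _ | ⟨lo, rest2⟩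
    · rw [hl] at hs; simp at hs
    rcases rest2 with _ | ⟨hi, rest3⟩
    · rw [hl] at hs; simp at hs
    rcases rest3 with _ | ⟨z, rest4⟩
    · -- exactly two parts
      simp only [List.foldl_cons, List.countP_cons, hl]
      rw [ih _ _ (fun u hu => h u (by simp [hu]))]
      split_ifs
      · simp; constructor <;> ring
      · simp; ring
    · rw [hl] at hs; simp at hs

-- ===== VERDICT (by name: the statement is the Claim_ definition above) =====
theorem count_prime_ranges_spec : Claim_equal_count_prime_ranges := by
  intro xs _ hpre
  show count_prime_ranges xs = count_prime_ranges_alt xs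
  rw [count_prime_ranges, count_prime_ranges_alt]
  rw [foldA xs 0 0 hpre]
  rw [PySem.List.foldl_add, PySem.List.sum_map_ite_one_zero, List.countP_map, List.countP_map]
  refine Prod.ext (by simp) ?_
  simp only [zero_add]
  congr 1
  apply List.countP_congr
  intro s hs
  have h2 := hpre s hs
  rcases hl : (PySem.Str.split? s "-").getD [] with _ | ⟨lo, rest2⟩
  · rw [hl] at h2; simp at h2
  rcases rest2 with _ | ⟨hi, rest3⟩
  · rw [hl] at h2; simp at h2
  rcases rest3 with _ | ⟨z, rest4⟩
  · have hbound : max (PySem.Str.len lo) (PySem.Str.len hi) ≤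
        PySem.List.maxD
          (List.map (fun ab => max ab.1 ab.2)
            (List.map partLens
              (List.map (fun s => (PySem.Str.split? s "-").getD []) xs)))
          (fun x => x) 0 := by
      apply le_maxD_id
      refine List.mem_map.mpr ⟨(PySem.Str.len lo, PySem.Str.len hi), ?_, rfl⟩
      refine List.mem_map.mpr ⟨(PySem.Str.split? s "-").getD [], ?_, by rw [hl]; rfl⟩
      exact List.mem_map.mpr ⟨s, hs, rfl⟩
    have hlo0 : 0 ≤ PySem.Str.len lo := by rw [PySem.Str.len_eq]; positivity
    have hhi0 : 0 ≤ PySem.Str.len hi := by rw [PySem.Str.len_eq]; positivity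
    simp only [Function.comp_apply, hl, partLens]
    rw [contains_primes_eq _ _ hlo0 (le_trans (le_max_left _ _) hbound),
        contains_primes_eq _ _ hhi0 (le_trans (le_max_right _ _) hbound)]
  · rw [hl] at h2; simp at h2
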